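-- pv_equiv track=rewrite | github.com/whitepaper2/algoDiary | algo-challenge/2.2.1-greedyExample.py | repairFrench
-- ===== SOURCE A (Python) =====
-- from typing import List
--
-- def repairFrench(A: List[int]) -> int:
--     """
--     工匠修理东西，类似于合并石头，每次可任意选择两个
--     优先队列解答
--     :param A:
--     :return:
--     """
--     import heapq
--     res = 0
--     minHeap = A
--     heapq.heapify(minHeap)
--     while minHeap and len(minHeap) > 1:
--         first = heapq.heappop(minHeap)
--         second = heapq.heappop(minHeap)
--         res += first + second
--         heapq.heappush(minHeap, first + second)
--     return res
-- ===== SOURCE B (Python) =====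
-- def repairFrench(A):
--     # Same return value as the heapq version; does NOT mutate A (A's heapify/pops do).
--     q = sorted(A)
--     res = 0
--     while len(q) > 1:
--         s = q[0] + q[1]
--         res += s
--         q = q[2:]
--         i = 0
--         while i < len(q) and q[i] < s:
--             i += 1
--         q.insert(i, s)
--     return res
-- ===== Notes on version B (the rewrite author's own statement) =====
-- stated objective: alternative
-- what changed: Replaces the binary heap with a sorted list: sort once, repeatedly take the two front elements and splice their sum back in by ordered insertion; A mutates its argument in place (heapify/pops), B does not.
import Mathlib
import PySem

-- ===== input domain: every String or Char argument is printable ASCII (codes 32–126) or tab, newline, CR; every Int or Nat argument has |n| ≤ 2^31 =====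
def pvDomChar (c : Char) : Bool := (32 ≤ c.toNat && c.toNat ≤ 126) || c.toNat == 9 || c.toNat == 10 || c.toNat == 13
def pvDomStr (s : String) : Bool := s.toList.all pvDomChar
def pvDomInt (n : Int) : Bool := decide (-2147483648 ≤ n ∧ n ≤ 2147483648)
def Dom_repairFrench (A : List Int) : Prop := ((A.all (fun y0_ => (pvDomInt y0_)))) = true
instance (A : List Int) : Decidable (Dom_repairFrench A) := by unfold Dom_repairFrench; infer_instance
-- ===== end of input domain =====

-- B replaces the binary heap with a sorted list (sort once, take the two front elements,
-- linear ordered insertion of their sum); return values agree — note A mutates its argument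
-- in place (heapify + pops), B does not: the equivalence proved here is about the return value.

-- ===== PORT A =====
-- heapq is ported at the abstract level it is observed at here: heappop returns the minimum
-- element and removes one occurrence of it, heappush adds an element. This is exact for a
-- List Int state: only the popped minima (and through them the multiset of elements) are
-- observable, and equal Ints are indistinguishable.
def heapPop (h : List Int) : Option (Int × List Int) :=
  (PySem.List.min? h (fun x => x)).bind
    (fun m => (PySem.List.remove? h m).map (fun h' => (m, h')))

theorem heapPop_length {h : List Int} {m : Int} {h' : List Int}
    (e : heapPop h = some (m, h')) : h'.length + 1 = h.length := by
  unfold heapPop at e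
  cases hm : PySem.List.min? h (fun x => x) with
  | none => rw [hm] at e; simp at e
  | some v =>
    have hv : v ∈ h := PySem.List.min?_mem hm
    rw [hm] at e
    simp only [Option.bind_some] at e
    rw [PySem.List.remove?_eq_some_erase h v hv] at e
    simp only [Option.map_some, Option.some.injEq, Prod.mk.injEq] at e
    obtain ⟨rfl, rfl⟩ := e
    have h1 := List.length_erase_of_mem hv
    have h2 : 0 < h.length := List.length_pos_of_mem hv
    omega

def heapLoop (h : List Int) (res : Int) : Int :=
  if 1 < h.length then
    match hp : heapPop h with
    | none => res
    | some (m1, h1) =>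
      match hp2 : heapPop h1 with
      | none => res
      | some (m2, h2) =>
        heapLoop (h2 ++ [m1 + m2]) (res + (m1 + m2))
  else res
termination_by h.length
decreasing_by
  have e1 := heapPop_length hp
  have e2 := heapPop_length hp2
  simp only [List.length_append, List.length_cons, List.length_nil]
  omega

def repairFrench (A : List Int) : Int := heapLoop A 0

-- ===== PORT B =====
-- Source B's hand-written linear ordered insertion (insert before the first element not < s)
-- is List.orderedInsert (· ≤ ·), which inserts at exactly that position.
def bLoop (q : List Int) (res : Int) : Int :=
  match q with
  | a :: b :: rest => bLoop (List.orderedInsert (· ≤ ·) (a + b) rest) (res + (a + b))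
  | _ => res
termination_by q.length
decreasing_by
  simp [List.orderedInsert_length]

def repairFrench_alt (A : List Int) : Int :=
  bLoop (PySem.List.sorted A (fun x => x)) 0

-- ===== PRECONDITION & SPEC =====
def Spec_repairFrench (A : List Int) (out : Int) : Prop := out = repairFrench_alt A
instance (A : List Int) (out : Int) : Decidable (Spec_repairFrench A out) := by unfold Spec_repairFrench; infer_instance

-- ===== CLAIM (what is proved, stated in full; the proofs are below) =====
def Claim_equal_repairFrench : Prop := ∀ (A : List Int), Dom_repairFrench A → Spec_repairFrench A (repairFrench A)

-- ===== LEMMAS AND PROOFS =====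

-- On a list that is a permutation of an ordered a :: t, heapPop pops exactly the value a
-- and leaves a permutation of t.
theorem heapPop_of_perm_sorted {h : List Int} {a : Int} {t : List Int}
    (hp : h.Perm (a :: t)) (hs : List.Pairwise (· ≤ ·) (a :: t)) :
    ∃ h1, heapPop h = some (a, h1) ∧ h1.Perm t := by
  have hne : h ≠ [] := by
    intro he; subst he; exact (List.not_mem_nil (a := a)) (hp.symm.mem_iff.mp (by simp))
  obtain ⟨v, hv⟩ : ∃ v, PySem.List.min? h (fun x => x) = some v := by
    cases hm : PySem.List.min? h (fun x => x) with
    | none => exact absurd ((PySem.List.min?_eq_none_iff h _).mp hm) hne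
    | some v => exact ⟨v, rfl⟩
  have hvmem : v ∈ h := PySem.List.min?_mem hv
  have hvmin : ∀ y ∈ h, v ≤ y := fun y hy => PySem.List.min?_isMin hv y hy
  have hamem : a ∈ h := hp.symm.mem_iff.mp (by simp)
  have hva : v = a := by
    have h1 : v ≤ a := hvmin a hamem
    have h2 : a ≤ v := by
      rcases List.mem_cons.mp (hp.mem_iff.mp hvmem) with h | h
      · omega
      · exact (List.pairwise_cons.mp hs).1 v h
    omega
  subst hva
  refine ⟨h.erase v, ?_, ?_⟩
  · unfold heapPop
    rw [hv]
    simp only [Option.bind_some]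
    rw [PySem.List.remove?_eq_some_erase h v hvmem]
    rfl
  · simpa using hp.erase v

theorem loop_eq (n : ℕ) : ∀ (q h : List Int) (res : Int), q.length ≤ n →
    h.Perm q → List.Pairwise (· ≤ ·) q → heapLoop h res = bLoop q res := by
  induction n with
  | zero =>
    intro q h res hn hperm _
    have hq : q = [] := List.length_eq_zero_iff.mp (Nat.le_zero.mp hn)
    subst hq
    have hh : h = [] := List.Perm.eq_nil hperm
    subst hh
    simp [heapLoop, bLoop]
  | succ n ih =>
    intro q h res hn hperm hsorted
    match q with
    | [] =>
      have hh : h = [] := List.Perm.eq_nil hperm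
      subst hh; simp [heapLoop, bLoop]
    | [a] =>
      have hlen : h.length = 1 := by simpa using hperm.length_eq
      rw [heapLoop, if_neg (by omega), bLoop]
      intro x y r hxy
      exact absurd hxy (by simp)
    | a :: b :: rest =>
      have hlen : h.length = rest.length + 2 := by simpa using hperm.length_eq
      obtain ⟨h1, e1, hp1⟩ := heapPop_of_perm_sorted hperm hsorted
      have hsorted' : List.Pairwise (· ≤ ·) (b :: rest) := (List.pairwise_cons.mp hsorted).2
      obtain ⟨h2, e2, hp2⟩ := heapPop_of_perm_sorted hp1 hsorted'
      rw [heapLoop, if_pos (by omega), bLoop]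
      split
      · next heq => rw [e1] at heq; cases heq
      · next m1 h1' heq =>
        rw [e1] at heq
        simp only [Option.some.injEq, Prod.mk.injEq] at heq
        rw [← heq.1, ← heq.2]
        split
        · next heq2 => rw [e2] at heq2; cases heq2
        · next m2 h2' heq2 =>
          rw [e2] at heq2
          simp only [Option.some.injEq, Prod.mk.injEq] at heq2
          rw [← heq2.1, ← heq2.2]
          have hsr : List.Pairwise (· ≤ ·) rest := (List.pairwise_cons.mp hsorted').2
          have hq' : List.Pairwise (· ≤ ·) (List.orderedInsert (· ≤ ·) (a + b) rest) :=
            List.Pairwise.orderedInsert (a + b) rest hsr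
          have hperm' : (h2 ++ [a + b]).Perm (List.orderedInsert (· ≤ ·) (a + b) rest) :=
            ((hp2.append_right _).trans (List.perm_append_singleton _ _)).trans
              (List.perm_orderedInsert _ _ _).symm
          have hlq : (List.orderedInsert (· ≤ ·) (a + b) rest).length ≤ n := by
            rw [List.orderedInsert_length]
            have : (a :: b :: rest).length ≤ n + 1 := hn
            simp at this; omega
          exact ih _ _ _ hlq hperm' hq'

-- ===== VERDICT (by name: the statement is the Claim_ definition above) =====
theorem repairFrench_spec : Claim_equal_repairFrench := by
  intro A _
  unfold Spec_repairFrench repairFrench repairFrench_alt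
  exact loop_eq (PySem.List.sorted A (fun x => x)).length (PySem.List.sorted A (fun x => x)) A 0
    le_rfl (PySem.List.sorted_perm A _ _).symm (PySem.List.sorted_pairwise A _)
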